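-- pv_equiv track=rewrite | github.com/akshay772/pythonDSAlgoPractices | scripts/words-split-from-string.py | splitWordsFromTextRecursive
-- ===== SOURCE A (Python) =====
-- def splitWordsFromTextRecursive(text, referenceOfWords, output=None):
--     # Checks to see if any output has been initiated.
--     # If you default output=[], it would be overwritten for every recursion!
--     if output is None:
--         output = []
--
--     # For every word in list
--     for word in referenceOfWords:
--         # If the current phrase begins with the word, we have a split point!
--         if text.startswith(word):
--             # Add the word to the output
--             output.append(word)
--
--             # Recursively call the split function on the remaining portion of the phrase--- phrase[len(word):]
--             # Remember to pass along the output and list of words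
--             return splitWordsFromTextRecursive(text[len(word):], referenceOfWords, output)
--
--     # Finally return output if no phrase.startswith(word) returns True
--     return output
-- ===== SOURCE B (Python) =====
-- def splitWordsFromTextRecursive(text, referenceOfWords, output=None):
--     # Same guard as the original: only create a fresh list when none was passed.
--     if output is None:
--         output = []
--     i = 0  # cursor into text; avoids slicing the string on every step
--     while True:
--         match = None
--         for word in referenceOfWords:
--             if text.startswith(word, i):
--                 match = word
--                 break
--         if match is None:
--             return output
--         output.append(match)
--         i += len(match)
-- ===== Notes on version B (the rewrite author's own statement) =====
-- stated objective: alternative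
-- what changed: Replaced A's tail recursion with re-sliced strings by an iterative while-loop that keeps a cursor into the original text and uses startswith(word, i), separating the inner first-match scan from the consuming loop.
import Mathlib
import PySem

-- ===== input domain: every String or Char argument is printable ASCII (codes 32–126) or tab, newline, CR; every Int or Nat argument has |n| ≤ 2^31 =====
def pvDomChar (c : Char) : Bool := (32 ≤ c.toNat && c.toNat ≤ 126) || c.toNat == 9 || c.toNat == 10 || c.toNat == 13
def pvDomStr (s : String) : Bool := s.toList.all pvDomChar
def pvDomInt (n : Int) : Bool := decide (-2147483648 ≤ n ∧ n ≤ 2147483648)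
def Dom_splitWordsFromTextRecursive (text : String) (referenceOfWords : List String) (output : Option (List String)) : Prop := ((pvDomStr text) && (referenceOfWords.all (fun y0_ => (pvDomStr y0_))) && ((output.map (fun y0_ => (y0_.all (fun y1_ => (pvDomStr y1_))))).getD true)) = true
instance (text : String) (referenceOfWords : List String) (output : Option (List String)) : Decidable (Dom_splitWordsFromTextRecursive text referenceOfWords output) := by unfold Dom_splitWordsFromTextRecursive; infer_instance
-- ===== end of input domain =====

-- B replaces A's slice-and-recurse with an iterative cursor loop whose inner first-match
-- scan is a separate pass (objective: alternative decomposition). A appends to the passed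
-- output list in place; B performs the same mutation; the equivalence is about the return value.

-- ===== PORT A =====
-- A's recursion: the 'for word in referenceOfWords' loop is the ws argument; on a prefix
-- match it appends and recurses on text[len(word):] (= cs.drop …, exact by slice_from_natCast)
-- with the full reference list. fuel = text length + 1 bounds the recursion depth and only
-- makes the definition total: under Pre_ (no empty word) each recursion consumes ≥ 1 char,
-- so the fuel-0 branch is never reached on admitted inputs.
def pvAgo (ref : List String) : Nat → List String → List Char → List String → List String
  | _, [], _, out => out
  | fuel, w :: ws, cs, out =>
      if PySem.Chars.startswith cs w.toList then
        match fuel with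
        | 0 => out
        | fuel' + 1 => pvAgo ref fuel' ref (cs.drop w.toList.length) (out ++ [w])
      else pvAgo ref fuel ws cs out
termination_by fuel ws => (fuel, ws.length)

def splitWordsFromTextRecursive (text : String) (referenceOfWords : List String) (output : Option (List String)) : List String :=
  pvAgo referenceOfWords (text.toList.length + 1) referenceOfWords text.toList (output.getD [])

-- ===== PORT B =====
-- B's inner scan: first word of ref that is a prefix of text at cursor i (text.startswith(word, i)).
def pvFindMatch (cs : List Char) (i : Nat) : List String → Option String
  | [] => none
  | w :: ws => if PySem.Chars.startswith (cs.drop i) w.toList then some w else pvFindMatch cs i ws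

-- B's 'while True' loop over the cursor i; fuel as in port A, a totality guard only.
def pvBloop (ref : List String) (cs : List Char) : Nat → Nat → List String → List String
  | 0, _, out => out
  | fuel + 1, i, out =>
      match pvFindMatch cs i ref with
      | none => out
      | some w => pvBloop ref cs fuel (i + w.toList.length) (out ++ [w])

def splitWordsFromTextRecursive_alt (text : String) (referenceOfWords : List String) (output : Option (List String)) : List String :=
  pvBloop referenceOfWords text.toList (text.toList.length + 1) 0 (output.getD [])

-- ===== PRECONDITION & SPEC =====
-- Pre_ excludes lists containing the empty word "": there Python A never returns
-- (infinite recursion, RecursionError) and Python B loops forever.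
def Pre_splitWordsFromTextRecursive (text : String) (referenceOfWords : List String) (output : Option (List String)) : Prop :=
  "" ∉ referenceOfWords
instance (text : String) (referenceOfWords : List String) (output : Option (List String)) : Decidable (Pre_splitWordsFromTextRecursive text referenceOfWords output) := by unfold Pre_splitWordsFromTextRecursive; infer_instance

def pvWitness_splitWordsFromTextRecursive : String × List String × Option (List String) :=
  ("thequickfox", ["the", "quick", "fox"], none)

def Spec_splitWordsFromTextRecursive (text : String) (referenceOfWords : List String) (output : Option (List String)) (out : List String) : Prop := out = splitWordsFromTextRecursive_alt text referenceOfWords output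
instance (text : String) (referenceOfWords : List String) (output : Option (List String)) (out : List String) : Decidable (Spec_splitWordsFromTextRecursive text referenceOfWords output out) := by unfold Spec_splitWordsFromTextRecursive; infer_instance

-- ===== CLAIM (what is proved, stated in full; the proofs are below) =====
def Claim_equal_splitWordsFromTextRecursive : Prop := ∀ (text : String) (referenceOfWords : List String) (output : Option (List String)), Dom_splitWordsFromTextRecursive text referenceOfWords output → Pre_splitWordsFromTextRecursive text referenceOfWords output → Spec_splitWordsFromTextRecursive text referenceOfWords output (splitWordsFromTextRecursive text referenceOfWords output)

-- ===== LEMMAS AND PROOFS =====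

theorem pvAgo_zero (ref : List String) (cs : List Char) (out : List String) :
    ∀ ws, pvAgo ref 0 ws cs out = out := by
  intro ws
  induction ws with
  | nil => simp [pvAgo]
  | cons w ws ih =>
      by_cases h : PySem.Chars.startswith cs w.toList
      · simp [pvAgo, h]
      · simp [pvAgo, h, ih]

-- A's inner for-loop, read through B's first-match scan.
theorem pvAgo_scan (ref : List String) (fuel : Nat) (cs : List Char) (i : Nat) (out : List String) :
    ∀ ws, pvAgo ref (fuel + 1) ws (cs.drop i) out =
      (match pvFindMatch cs i ws with
       | none => out
       | some w => pvAgo ref fuel ref ((cs.drop i).drop w.toList.length) (out ++ [w])) := by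
  intro ws
  induction ws with
  | nil => simp [pvAgo, pvFindMatch]
  | cons w ws ih =>
      by_cases h : PySem.Chars.startswith (cs.drop i) w.toList
      · simp [pvAgo, pvFindMatch, h]
      · simp [pvAgo, pvFindMatch, h, ih]

-- The two loops agree step for step (same fuel, cursor i versus the dropped remainder).
theorem pvBloop_eq_pvAgo (ref : List String) (cs : List Char) :
    ∀ fuel i out, pvBloop ref cs fuel i out = pvAgo ref fuel ref (cs.drop i) out := by
  intro fuel
  induction fuel with
  | zero =>
      intro i out
      simp [pvBloop, pvAgo_zero]
  | succ n ih =>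
      intro i out
      rw [pvAgo_scan ref n cs i out ref]
      simp only [pvBloop]
      cases h : pvFindMatch cs i ref with
      | none => rfl
      | some w =>
          simp only [ih, List.drop_drop]

-- ===== VERDICT (by name: the statement is the Claim_ definition above) =====
theorem splitWordsFromTextRecursive_spec : Claim_equal_splitWordsFromTextRecursive := by
  intro text ref output _ _
  unfold Spec_splitWordsFromTextRecursive splitWordsFromTextRecursive splitWordsFromTextRecursive_alt
  rw [pvBloop_eq_pvAgo]
  simp
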